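-- pv_equiv track=rewrite | github.com/binduchck/weatherinfo | weather_info_app/scheduler.py | wind_range_check
-- ===== SOURCE A (Python) =====
-- def wind_range_check(speed):
--     wind_speed_check = {range(0,1):'Calm', range(1,6):'Light air', range(6,12):'Light breeze',
--     range(12,20):'Gentle breeze', range(20,29):'Moderate breeze', range(29,39):'Fresh breeze', range(39,40):'Strong breeze',range(40,60):'Strong winds',range(39,40):'Very Strong winds'}
--     for k,v in wind_speed_check.items():
--         if int(speed) in k:
--             return v
--         elif int(speed) > 40:
--             return "Wind alert"
--         else:
--             continue
--     return "Data Not found"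
-- ===== SOURCE B (Python) =====
-- def wind_range_check(speed):
--     n = int(speed)
--     if n < 0:
--         return "Data Not found"
--     if n == 0:
--         return "Calm"
--     if n <= 5:
--         return "Light air"
--     if n <= 11:
--         return "Light breeze"
--     if n <= 19:
--         return "Gentle breeze"
--     if n <= 28:
--         return "Moderate breeze"
--     if n <= 38:
--         return "Fresh breeze"
--     if n == 39:
--         return "Very Strong winds"
--     if n == 40:
--         return "Strong winds"
--     return "Wind alert"
-- ===== Notes on version B (the rewrite author's own statement) =====
-- stated objective: simpler
-- what changed: Replaced the dict-of-range-objects plus membership loop (with a duplicate key silently overwriting 'Strong breeze') by a flat ordered comparison ladder on the integer speed.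
import Mathlib
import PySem

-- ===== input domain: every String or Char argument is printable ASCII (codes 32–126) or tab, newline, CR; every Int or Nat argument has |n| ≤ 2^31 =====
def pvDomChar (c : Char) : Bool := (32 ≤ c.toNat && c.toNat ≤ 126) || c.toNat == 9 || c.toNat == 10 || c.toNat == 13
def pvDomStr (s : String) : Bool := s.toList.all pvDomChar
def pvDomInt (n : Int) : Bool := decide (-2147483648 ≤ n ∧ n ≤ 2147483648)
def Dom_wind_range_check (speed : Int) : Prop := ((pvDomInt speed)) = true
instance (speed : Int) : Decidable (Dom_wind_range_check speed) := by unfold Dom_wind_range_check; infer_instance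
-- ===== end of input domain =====

-- B replaces A's dict-of-ranges-and-loop by a flat ordered comparison ladder (simpler).


-- ===== PORT A =====
-- Python dict literal with range keys; the duplicate key range(39,40) overwrites 'Strong breeze' in place.
def windTable : PySem.Dict (Int × Int) String :=
  PySem.Dict.ofList [((0,1),"Calm"), ((1,6),"Light air"), ((6,12),"Light breeze"),
    ((12,20),"Gentle breeze"), ((20,29),"Moderate breeze"), ((29,39),"Fresh breeze"),
    ((39,40),"Strong breeze"), ((40,60),"Strong winds"), ((39,40),"Very Strong winds")]

-- the 'for k,v in … .items()' loop, step for step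
def windLoop (speed : Int) : List ((Int × Int) × String) → String
  | [] => "Data Not found"
  | (k, v) :: rest =>
    if k.1 ≤ speed ∧ speed < k.2 then v
    else if speed > 40 then "Wind alert"
    else windLoop speed rest

def wind_range_check (speed : Int) : String := windLoop speed windTable.items

-- ===== PORT B =====
def wind_range_check_alt (speed : Int) : String :=
  if speed < 0 then "Data Not found"
  else if speed = 0 then "Calm"
  else if speed ≤ 5 then "Light air"
  else if speed ≤ 11 then "Light breeze"
  else if speed ≤ 19 then "Gentle breeze"
  else if speed ≤ 28 then "Moderate breeze"
  else if speed ≤ 38 then "Fresh breeze"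
  else if speed = 39 then "Very Strong winds"
  else if speed = 40 then "Strong winds"
  else "Wind alert"

-- ===== PRECONDITION & SPEC =====
def Spec_wind_range_check (speed : Int) (out : String) : Prop := out = wind_range_check_alt speed
instance (speed : Int) (out : String) : Decidable (Spec_wind_range_check speed out) := by unfold Spec_wind_range_check; infer_instance

-- ===== CLAIM (what is proved, stated in full; the proofs are below) =====
def Claim_equal_wind_range_check : Prop := ∀ (speed : Int), Dom_wind_range_check speed → Spec_wind_range_check speed (wind_range_check speed)

-- ===== LEMMAS AND PROOFS =====
theorem windTable_items : windTable.items =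
    [((0,1),"Calm"), ((1,6),"Light air"), ((6,12),"Light breeze"),
     ((12,20),"Gentle breeze"), ((20,29),"Moderate breeze"), ((29,39),"Fresh breeze"),
     ((39,40),"Very Strong winds"), ((40,60),"Strong winds")] := by decide

-- ===== VERDICT (by name: the statement is the Claim_ definition above) =====
theorem wind_range_check_spec : Claim_equal_wind_range_check := by
  intro s _
  unfold Spec_wind_range_check
  by_cases h1 : s < 0
  · unfold wind_range_check wind_range_check_alt
    rw [windTable_items]
    simp only [windLoop]
    rw [if_neg (by omega), if_neg (by omega), if_neg (by omega), if_neg (by omega),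
        if_neg (by omega), if_neg (by omega), if_neg (by omega), if_neg (by omega),
        if_neg (by omega), if_neg (by omega), if_neg (by omega), if_neg (by omega),
        if_neg (by omega), if_neg (by omega), if_neg (by omega), if_neg (by omega),
        if_pos h1]
  by_cases h2 : 40 < s
  · unfold wind_range_check wind_range_check_alt
    rw [windTable_items]
    simp only [windLoop]
    rw [if_neg (by omega), if_pos h2, if_neg (by omega), if_neg (by omega),
        if_neg (by omega), if_neg (by omega), if_neg (by omega), if_neg (by omega),
        if_neg (by omega), if_neg (by omega), if_neg (by omega)]
  · have hlo : 0 ≤ s := by omega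
    have hhi : s ≤ 40 := by omega
    interval_cases s <;> decide
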